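-- pv_equiv track=rewrite | github.com/CptMeetKat/Adv2024 | Day7/AOCD07P1.py | permuteToTotal
-- ===== SOURCE A (Python) =====
-- def permuteToTotal(target, values, running_total):
--
--     if running_total == target:
--         return True
--     else:
--         if len(values) == 0:
--             return False
--         next = values.pop(0)
--
--         if permuteToTotal(target, values.copy(), running_total + next):
--             return True
--         elif permuteToTotal(target, values.copy(), running_total * next):
--             return True
--
--     return False
-- ===== SOURCE B (Python) =====
-- def permuteToTotal(target, values, running_total):
--     totals = {running_total}
--     for v in values:
--         if target in totals:
--             return True
--         totals = {t + v for t in totals} | {t * v for t in totals}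
--     return target in totals
-- ===== Notes on version B (the rewrite author's own statement) =====
-- stated objective: alternative
-- what changed: Replaces the branching recursion (with list copies per call) by an iterative breadth-first reachable-set DP: one deduplicated set of all totals reachable from the consumed prefix, updated once per value, with the same per-prefix target test and early return.
import Mathlib
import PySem

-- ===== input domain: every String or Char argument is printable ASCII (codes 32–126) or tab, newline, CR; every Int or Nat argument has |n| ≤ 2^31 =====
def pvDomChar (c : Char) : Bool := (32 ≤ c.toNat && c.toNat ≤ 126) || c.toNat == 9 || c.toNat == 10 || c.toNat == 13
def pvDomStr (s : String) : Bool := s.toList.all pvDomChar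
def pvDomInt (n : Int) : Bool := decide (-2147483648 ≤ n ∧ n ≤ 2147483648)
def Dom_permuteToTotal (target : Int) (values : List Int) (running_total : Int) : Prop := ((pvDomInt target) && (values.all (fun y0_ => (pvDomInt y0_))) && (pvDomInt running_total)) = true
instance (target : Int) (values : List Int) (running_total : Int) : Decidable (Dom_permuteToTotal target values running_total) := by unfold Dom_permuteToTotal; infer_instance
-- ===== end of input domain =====

-- B replaces A's branching recursion by an iterative reachable-set DP (one deduplicated set
-- of all totals reachable from the prefix, updated per value). Return values agree everywhere;
-- A additionally MUTATES `values` (pops its first element when running_total ≠ target and the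
-- list is nonempty) while B leaves it unchanged — the equivalence proved here is about the
-- return value only.

-- ===== PORT A =====
-- `values.pop(0)` + recursion on `values.copy()`: the recursive calls receive the tail of the list.
def permuteToTotal (target : Int) (values : List Int) (running_total : Int) : Bool :=
  if running_total = target then true
  else
    match values with
    | [] => false
    | next :: rest =>
      if permuteToTotal target rest (running_total + next) then true
      else if permuteToTotal target rest (running_total * next) then true
      else false

-- ===== PORT B =====
-- `{t + v for t in totals} | {t * v for t in totals}` (result depends only on membership, not on set order)
def permuteStep (v : Int) (totals : PySem.Set Int) : PySem.Set Int :=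
  PySem.Set.union (PySem.Set.ofList (totals.map (fun t => t + v))) (totals.map (fun t => t * v))

-- the `for v in values` loop with its early return, carrying `totals`
def permuteLoop (target : Int) (values : List Int) (totals : PySem.Set Int) : Bool :=
  match values with
  | [] => PySem.Set.contains totals target
  | v :: rest =>
    if PySem.Set.contains totals target then true
    else permuteLoop target rest (permuteStep v totals)

def permuteToTotal_alt (target : Int) (values : List Int) (running_total : Int) : Bool :=
  permuteLoop target values (PySem.Set.ofList [running_total])

-- ===== PRECONDITION & SPEC =====
def Spec_permuteToTotal (target : Int) (values : List Int) (running_total : Int) (out : Bool) : Prop := out = permuteToTotal_alt target values running_total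
instance (target : Int) (values : List Int) (running_total : Int) (out : Bool) : Decidable (Spec_permuteToTotal target values running_total out) := by unfold Spec_permuteToTotal; infer_instance

-- ===== CLAIM (what is proved, stated in full; the proofs are below) =====
def Claim_equal_permuteToTotal : Prop := ∀ (target : Int) (values : List Int) (running_total : Int), Dom_permuteToTotal target values running_total → Spec_permuteToTotal target values running_total (permuteToTotal target values running_total)

-- ===== LEMMAS AND PROOFS =====

theorem mem_permuteStep (v x : Int) (S : PySem.Set Int) :
    x ∈ permuteStep v S ↔ ∃ t ∈ S, x = t + v ∨ x = t * v := by
  unfold permuteStep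
  rw [PySem.Set.mem_union, PySem.Set.mem_ofList]
  simp only [List.mem_map]
  constructor
  · rintro (⟨t, ht, rfl⟩ | ⟨t, ht, rfl⟩) <;> exact ⟨t, ht, by simp⟩
  · rintro ⟨t, ht, rfl | rfl⟩
    · exact Or.inl ⟨t, ht, rfl⟩
    · exact Or.inr ⟨t, ht, rfl⟩

-- loop invariant: the loop succeeds iff A succeeds from some total in the carried set
theorem permuteLoop_iff (target : Int) (values : List Int) :
    ∀ S : PySem.Set Int,
      (permuteLoop target values S = true ↔ ∃ t ∈ S, permuteToTotal target values t = true) := by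
  induction values with
  | nil =>
    intro S
    simp only [permuteLoop, permuteToTotal, PySem.Set.contains_iff]
    constructor
    · intro h; exact ⟨target, h, by simp⟩
    · rintro ⟨t, ht, h⟩
      by_cases he : t = target
      · exact he ▸ ht
      · simp [he] at h
  | cons v rest ih =>
    intro S
    by_cases hS : target ∈ S
    · constructor
      · intro _
        refine ⟨target, hS, ?_⟩
        simp [permuteToTotal]
      · intro _
        simp only [permuteLoop]
        rw [if_pos ((PySem.Set.contains_iff S target).2 hS)]
    · have hc : PySem.Set.contains S target = false := by
        rw [Bool.eq_false_iff]; intro h; exact hS ((PySem.Set.contains_iff S target).1 h)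
      simp only [permuteLoop, hc, Bool.false_eq_true, if_false]
      rw [ih (permuteStep v S)]
      constructor
      · rintro ⟨x, hx, hAx⟩
        obtain ⟨t, ht, rfl | rfl⟩ := (mem_permuteStep v x S).1 hx
        · refine ⟨t, ht, ?_⟩
          have hne : t ≠ target := fun h => hS (h ▸ ht)
          simp [permuteToTotal, hne, hAx]
        · refine ⟨t, ht, ?_⟩
          have hne : t ≠ target := fun h => hS (h ▸ ht)
          simp only [permuteToTotal, if_neg hne]
          rcases Bool.eq_false_or_eq_true (permuteToTotal target rest (t + v)) with h | h <;>
            simp [h, hAx]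
      · rintro ⟨t, ht, hAt⟩
        have hne : t ≠ target := fun h => hS (h ▸ ht)
        simp only [permuteToTotal, if_neg hne] at hAt
        by_cases h1 : permuteToTotal target rest (t + v) = true
        · exact ⟨t + v, (mem_permuteStep v _ S).2 ⟨t, ht, Or.inl rfl⟩, h1⟩
        · refine ⟨t * v, (mem_permuteStep v _ S).2 ⟨t, ht, Or.inr rfl⟩, ?_⟩
          simp only [Bool.not_eq_true] at h1
          rcases Bool.eq_false_or_eq_true (permuteToTotal target rest (t * v)) with h2 | h2
          · exact h2
          · simp [h1, h2] at hAt

-- ===== VERDICT (by name: the statement is the Claim_ definition above) =====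
theorem permuteToTotal_spec : Claim_equal_permuteToTotal := by
  intro target values running_total _
  unfold Spec_permuteToTotal permuteToTotal_alt
  have h := permuteLoop_iff target values (PySem.Set.ofList [running_total])
  rcases Bool.eq_false_or_eq_true (permuteToTotal target values running_total) with hA | hA
  · rw [hA]; symm
    exact h.2 ⟨running_total, by rw [PySem.Set.mem_ofList]; simp, hA⟩
  · rw [hA]
    symm; rw [Bool.eq_false_iff]
    intro hB
    obtain ⟨t, ht, hAt⟩ := h.1 hB
    rw [PySem.Set.mem_ofList] at ht
    simp at ht
    rw [ht] at hAt
    rw [hAt] at hA; exact absurd hA (by simp)
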